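-- pv_equiv track=rewrite | github.com/hariharpatel1/oncall-Insight-agent | ui/components/tabs/logs_tab.py | get_log_statistics
-- ===== SOURCE A (Python) =====
-- def get_log_statistics(logs: list) -> dict:
--     """Calculate log statistics"""
--     stats = {
--         'total': len(logs),
--         'error_count': 0,
--         'warning_count': 0,
--         'info_count': 0,
--         'debug_count': 0
--     }
--
--     for log in logs:
--         level = log.get('level', '').upper()
--         if level == 'ERROR':
--             stats['error_count'] += 1
--         elif level == 'WARNING':
--             stats['warning_count'] += 1
--         elif level == 'INFO':
--             stats['info_count'] += 1
--         elif level == 'DEBUG':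
--             stats['debug_count'] += 1
--
--     return stats
-- ===== SOURCE B (Python) =====
-- def get_log_statistics(logs: list) -> dict:
--     """Calculate log statistics by divide-and-conquer: count tuples for each
--     half are computed recursively and merged component-wise."""
--     def count4(lo, hi):
--         if hi - lo <= 1:
--             if hi - lo == 0:
--                 return (0, 0, 0, 0)
--             lvl = logs[lo].get('level', '').upper()
--             return (int(lvl == 'ERROR'), int(lvl == 'WARNING'),
--                     int(lvl == 'INFO'), int(lvl == 'DEBUG'))
--         mid = (lo + hi) // 2
--         a = count4(lo, mid)
--         b = count4(mid, hi)
--         return (a[0] + b[0], a[1] + b[1], a[2] + b[2], a[3] + b[3])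
--
--     e, w, i, d = count4(0, len(logs))
--     return {'total': len(logs), 'error_count': e, 'warning_count': w,
--             'info_count': i, 'debug_count': d}
-- ===== Notes on version B (the rewrite author's own statement) =====
-- stated objective: alternative
-- what changed: Replaces the sequential if/elif accumulator loop over a mutable dict with a divide-and-conquer recursion that splits the index range in half, computes a (error,warning,info,debug) count tuple for each half, and merges the tuples component-wise; the result dict is built once at the end.
import Mathlib
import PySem

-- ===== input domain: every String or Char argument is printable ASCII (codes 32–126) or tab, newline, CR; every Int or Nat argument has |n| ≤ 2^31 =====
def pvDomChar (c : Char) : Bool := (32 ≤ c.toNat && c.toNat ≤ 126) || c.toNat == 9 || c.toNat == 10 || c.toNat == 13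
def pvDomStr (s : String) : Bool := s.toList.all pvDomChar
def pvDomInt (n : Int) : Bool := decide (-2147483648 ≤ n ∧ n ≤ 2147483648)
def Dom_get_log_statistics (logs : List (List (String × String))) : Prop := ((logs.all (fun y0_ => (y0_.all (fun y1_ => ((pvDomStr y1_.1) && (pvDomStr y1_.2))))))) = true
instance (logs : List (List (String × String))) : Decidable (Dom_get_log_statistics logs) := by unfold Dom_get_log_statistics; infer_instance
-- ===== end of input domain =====

-- B replaces A's sequential if/elif loop over a mutable dict with a
-- divide-and-conquer recursion: count tuples for each half of the list are
-- computed recursively and merged component-wise (alternative; same cost).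

-- ===== PORT A =====
def pvMkStats (n e w i d : Int) : PySem.Dict String Int :=
  ((((PySem.Dict.empty.insert "total" n).insert "error_count" e).insert
      "warning_count" w).insert "info_count" i).insert "debug_count" d

def pvLevel (log : List (String × String)) : String :=
  PySem.Str.upper ((PySem.Dict.ofList log).getD "level" "")

def pvStepA (stats : PySem.Dict String Int) (log : List (String × String)) : PySem.Dict String Int :=
  let level := pvLevel log
  if level = "ERROR" then stats.modify "error_count" 0 (· + 1)
  else if level = "WARNING" then stats.modify "warning_count" 0 (· + 1)
  else if level = "INFO" then stats.modify "info_count" 0 (· + 1)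
  else if level = "DEBUG" then stats.modify "debug_count" 0 (· + 1)
  else stats

def get_log_statistics (logs : List (List (String × String))) : List (String × Int) :=
  let stats := pvMkStats (logs.length : Int) 0 0 0 0
  (logs.foldl pvStepA stats).items

-- ===== PORT B =====
-- count4: split the list in half (mid - lo = (hi-lo)//2, i.e. take/drop at length/2),
-- recurse on both halves, merge the count tuples component-wise.
def pvCount4 (l : List (List (String × String))) : Int × Int × Int × Int :=
  if _h : l.length ≤ 1 then
    match l with
    | [] => (0, 0, 0, 0)
    | x :: _ =>
      let lvl := pvLevel x
      ((if lvl = "ERROR" then 1 else 0), (if lvl = "WARNING" then 1 else 0),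
       (if lvl = "INFO" then 1 else 0), (if lvl = "DEBUG" then 1 else 0))
  else
    let k := l.length / 2
    let a := pvCount4 (l.take k)
    let b := pvCount4 (l.drop k)
    (a.1 + b.1, a.2.1 + b.2.1, a.2.2.1 + b.2.2.1, a.2.2.2 + b.2.2.2)
termination_by l.length
decreasing_by
  all_goals simp [List.length_take, List.length_drop]
  all_goals omega

def get_log_statistics_alt (logs : List (List (String × String))) : List (String × Int) :=
  let c := pvCount4 logs
  [("total", (logs.length : Int)), ("error_count", c.1), ("warning_count", c.2.1),
   ("info_count", c.2.2.1), ("debug_count", c.2.2.2)]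

-- ===== PRECONDITION & SPEC =====
def Spec_get_log_statistics (logs : List (List (String × String))) (out : List (String × Int)) : Prop := out = get_log_statistics_alt logs
instance (logs : List (List (String × String))) (out : List (String × Int)) : Decidable (Spec_get_log_statistics logs out) := by unfold Spec_get_log_statistics; infer_instance

-- ===== CLAIM (what is proved, stated in full; the proofs are below) =====
def Claim_equal_get_log_statistics : Prop := ∀ (logs : List (List (String × String))), Dom_get_log_statistics logs → Spec_get_log_statistics logs (get_log_statistics logs)

-- ===== LEMMAS AND PROOFS =====

lemma pvStepA_mk (log : List (String × String)) (n e w i d : Int) :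
    pvStepA (pvMkStats n e w i d) log =
      pvMkStats n (e + if pvLevel log = "ERROR" then 1 else 0)
        (w + if pvLevel log = "WARNING" then 1 else 0)
        (i + if pvLevel log = "INFO" then 1 else 0)
        (d + if pvLevel log = "DEBUG" then 1 else 0) := by
  unfold pvStepA
  by_cases h1 : pvLevel log = "ERROR" <;>
    by_cases h2 : pvLevel log = "WARNING" <;>
      by_cases h3 : pvLevel log = "INFO" <;>
        by_cases h4 : pvLevel log = "DEBUG" <;>
  simp_all [pvMkStats, PySem.Dict.modify, PySem.Dict.insert, PySem.Dict.getD, PySem.Dict.get?, PySem.Dict.empty]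

lemma pvFoldA (logs : List (List (String × String))) (n e w i d : Int) :
    logs.foldl pvStepA (pvMkStats n e w i d) =
      pvMkStats n (e + ((logs.map pvLevel).count "ERROR" : Int))
        (w + ((logs.map pvLevel).count "WARNING" : Int))
        (i + ((logs.map pvLevel).count "INFO" : Int))
        (d + ((logs.map pvLevel).count "DEBUG" : Int)) := by
  induction logs generalizing e w i d with
  | nil => simp
  | cons x xs ih =>
    simp only [List.foldl_cons, pvStepA_mk, ih, List.map_cons, List.count_cons]
    have key : ∀ (a b c dd a' b' c' dd' : Int), a = a' → b = b' → c = c' → dd = dd' →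
        pvMkStats n a b c dd = pvMkStats n a' b' c' dd' := by
      rintro _ _ _ _ _ _ _ _ rfl rfl rfl rfl; rfl
    apply key <;>
    · rcases eq_or_ne (pvLevel x) "ERROR" with h|h <;>
      rcases eq_or_ne (pvLevel x) "WARNING" with h2|h2 <;>
      rcases eq_or_ne (pvLevel x) "INFO" with h3|h3 <;>
      rcases eq_or_ne (pvLevel x) "DEBUG" with h4|h4 <;>
      simp_all <;> (try (push_cast; try ring))

-- the divide-and-conquer recursion computes exactly the four level counts
lemma pvCount4_eq : ∀ (n : ℕ) (l : List (List (String × String))), l.length = n →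
    pvCount4 l = (((l.map pvLevel).count "ERROR" : Int), ((l.map pvLevel).count "WARNING" : Int),
      ((l.map pvLevel).count "INFO" : Int), ((l.map pvLevel).count "DEBUG" : Int)) := by
  intro n
  induction n using Nat.strong_induction_on with
  | _ n ih =>
    intro l hl
    rw [pvCount4]
    by_cases h : l.length ≤ 1
    · match l with
      | [] => simp
      | [x] => simp [List.count_cons]
      | x :: y :: t => simp at h
    · simp only [h, dif_neg, not_false_iff]
      have hk1 : (l.take (l.length / 2)).length < n := by
        simp [List.length_take]; omega
      have hk2 : (l.drop (l.length / 2)).length < n := by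
        simp [List.length_drop]; omega
      rw [ih _ hk1 _ rfl, ih _ hk2 _ rfl]
      have hsplit : l = l.take (l.length / 2) ++ l.drop (l.length / 2) :=
        (List.take_append_drop _ _).symm
      simp only [Prod.mk.injEq]
      refine ⟨?_, ?_, ?_, ?_⟩ <;>
        rw [← Nat.cast_add, ← List.count_append, ← List.map_append, List.take_append_drop]

-- ===== VERDICT (by name: the statement is the Claim_ definition above) =====
theorem get_log_statistics_spec : Claim_equal_get_log_statistics := by
  intro logs _
  unfold Spec_get_log_statistics get_log_statistics get_log_statistics_alt
  simp only [pvFoldA, pvCount4_eq logs.length logs rfl, zero_add]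
  rfl
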